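-- pv_equiv track=rewrite | github.com/msys2/pacdb | pacdb.py | _parse_desc
-- ===== SOURCE A (Python) =====
-- from typing import Dict, List, Set, Any, Tuple, Optional, Union, Iterator
--
-- _PackageEntry = Dict[str, List[str]]
--
-- def _parse_desc(t: str) -> _PackageEntry:
--     d: _PackageEntry = {}
--     cat = None
--     values: List[str] = []
--     for l in t.splitlines():
--         l = l.strip()
--         if cat is None:
--             cat = l
--         elif not l:
--             d[cat] = values
--             cat = None
--             values = []
--         else:
--             values.append(l)
--     if cat is not None:
--         d[cat] = values
--     return d
-- ===== SOURCE B (Python) =====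
-- def _parse_desc(t):
--     d = {}
--     it = iter(t.splitlines())
--     for line in it:
--         cat = line.strip()
--         values = []
--         for inner in it:
--             inner = inner.strip()
--             if not inner:
--                 break
--             values.append(inner)
--         d[cat] = values
--     return d
-- ===== Notes on version B (the rewrite author's own statement) =====
-- stated objective: idiomatic
-- what changed: Replaced the flat cat-is-None state machine over one loop by nested loops sharing a single line iterator: the outer loop reads the category line, the inner loop consumes value lines until a blank, and the record is assigned unconditionally after the inner loop, removing the optional-state variable and the trailing flush.
import Mathlib
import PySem

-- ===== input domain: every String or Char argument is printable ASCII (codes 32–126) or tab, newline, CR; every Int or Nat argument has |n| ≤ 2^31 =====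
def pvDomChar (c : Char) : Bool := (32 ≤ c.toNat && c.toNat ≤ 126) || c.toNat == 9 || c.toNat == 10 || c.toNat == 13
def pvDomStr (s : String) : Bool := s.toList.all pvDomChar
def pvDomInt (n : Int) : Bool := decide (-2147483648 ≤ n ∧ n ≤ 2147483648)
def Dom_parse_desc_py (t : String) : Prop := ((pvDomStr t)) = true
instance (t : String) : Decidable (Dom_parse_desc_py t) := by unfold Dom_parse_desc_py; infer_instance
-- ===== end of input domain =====

-- B parses with nested loops over one shared line iterator instead of A's flat optional-state machine; same output.


-- ===== PORT A =====
-- loop state: (dict so far, current category or none, values so far)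
def pvStepA (s : PySem.Dict String (List String) × Option String × List String) (l : String) :
    PySem.Dict String (List String) × Option String × List String :=
  let l' := PySem.Str.strip l
  match s with
  | (d, none, vs) => (d, some l', vs)
  | (d, some cat, vs) =>
      if l' = "" then (d.insert cat vs, none, [])
      else (d, some cat, vs ++ [l'])

-- trailing 'if cat is not None: d[cat] = values'
def pvFinishA : PySem.Dict String (List String) × Option String × List String →
    List (String × List String)
  | (d, none, _) => d.items
  | (d, some cat, vs) => (d.insert cat vs).items

def parse_desc_py (t : String) : List (String × List String) :=
  pvFinishA ((PySem.Str.splitlines t).foldl pvStepA (PySem.Dict.empty, none, []))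

-- ===== PORT B =====
-- inner 'for inner in it': returns (stripped values up to the first blank, remaining lines)
def pvCollectB : List String → List String × List String
  | [] => ([], [])
  | l :: rest =>
      let l' := PySem.Str.strip l
      if l' = "" then ([], rest)
      else
        let p := pvCollectB rest
        (l' :: p.1, p.2)

theorem pvCollectB_len : ∀ (xs : List String), (pvCollectB xs).2.length ≤ xs.length := by
  intro xs
  induction xs with
  | nil => simp [pvCollectB]
  | cons l rest ih =>
      simp only [pvCollectB]
      split
      · simp
      · simpa using Nat.le_succ_of_le ih

-- outer 'for line in it' over the shared iterator
def pvGoB : List String → PySem.Dict String (List String) → PySem.Dict String (List String)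
  | [], d => d
  | l :: rest, d =>
      pvGoB (pvCollectB rest).2 (d.insert (PySem.Str.strip l) (pvCollectB rest).1)
  termination_by xs _ => xs.length
  decreasing_by
    exact Nat.lt_succ_of_le (pvCollectB_len rest)

def parse_desc_py_alt (t : String) : List (String × List String) :=
  (pvGoB (PySem.Str.splitlines t) PySem.Dict.empty).items

-- ===== PRECONDITION & SPEC =====
def Spec_parse_desc_py (t : String) (out : List (String × List String)) : Prop := out = parse_desc_py_alt t
instance (t : String) (out : List (String × List String)) : Decidable (Spec_parse_desc_py t out) := by unfold Spec_parse_desc_py; infer_instance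

-- ===== CLAIM (what is proved, stated in full; the proofs are below) =====
def Claim_equal_parse_desc_py : Prop := ∀ (t : String), Dom_parse_desc_py t → Spec_parse_desc_py t (parse_desc_py t)

-- ===== LEMMAS AND PROOFS =====

-- both statements of the fold/nested-loop correspondence, by strong induction on the line count
theorem pv_main : ∀ (n : Nat) (lines : List String), lines.length = n →
    (∀ d, pvFinishA (lines.foldl pvStepA (d, none, [])) = (pvGoB lines d).items) ∧
    (∀ d cat vs, pvFinishA (lines.foldl pvStepA (d, some cat, vs)) =
      (pvGoB (pvCollectB lines).2 (d.insert cat (vs ++ (pvCollectB lines).1))).items) := by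
  intro n
  induction n using Nat.strong_induction_on with
  | _ n ih =>
    intro lines hlen
    cases lines with
    | nil =>
        constructor
        · intro d; simp [pvFinishA, pvGoB]
        · intro d cat vs; simp [pvFinishA, pvGoB, pvCollectB]
    | cons l rest =>
        have hr : rest.length < n := by simp at hlen; omega
        have IH := ih rest.length hr rest rfl
        constructor
        · intro d
          have : (l :: rest).foldl pvStepA (d, none, []) =
              rest.foldl pvStepA (d, some (PySem.Str.strip l), []) := by
            simp [pvStepA]
          rw [this, (IH.2 d (PySem.Str.strip l) [])]
          simp [pvGoB]
        · intro d cat vs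
          by_cases h : PySem.Str.strip l = ""
          · have : (l :: rest).foldl pvStepA (d, some cat, vs) =
                rest.foldl pvStepA (d.insert cat vs, none, []) := by
              simp [pvStepA, h]
            rw [this, IH.1 (d.insert cat vs)]
            simp [pvCollectB, h]
          · have : (l :: rest).foldl pvStepA (d, some cat, vs) =
                rest.foldl pvStepA (d, some cat, vs ++ [PySem.Str.strip l]) := by
              simp [pvStepA, h]
            rw [this, IH.2 d cat (vs ++ [PySem.Str.strip l])]
            simp [pvCollectB, h]

-- ===== VERDICT (by name: the statement is the Claim_ definition above) =====
theorem parse_desc_py_spec : Claim_equal_parse_desc_py := by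
  intro t _
  unfold Spec_parse_desc_py parse_desc_py parse_desc_py_alt
  exact (pv_main (PySem.Str.splitlines t).length (PySem.Str.splitlines t) rfl).1 PySem.Dict.empty
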